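-- pv_equiv track=rewrite | github.com/nihal223/Python-Playground | CTCI/Chapter1/08-zero-matrix.py | zero_matrix_rotate
-- ===== SOURCE A (Python) =====
-- def zero_matrix_rotate(m):
--     m_r = list(zip(*m[::-1]))
--     for i in range(len(m_r)):
--         if 0 in m_r[i]:
--             m_r[i] = [0 for _ in range(len(m_r[i]))]
--
--     m1 = list(zip(*m_r[::-1]))
--     m2 = list(zip(*m1[::-1]))
--     m3 = list(zip(*m2[::-1]))
--
--     return m3
-- ===== SOURCE B (Python) =====
-- def zero_matrix_rotate(m):
--     # Zero every column (up to the minimum row width) that contains a 0,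
--     # rebuilding the rows directly by index -- no rotations or transposes.
--     if not m:
--         return []
--     w = min(len(r) for r in m)
--     if w == 0:
--         return []
--     bad = [any(r[j] == 0 for r in m) for j in range(w)]
--     return [tuple(0 if bad[j] else r[j] for j in range(w)) for r in m]
-- ===== Notes on version B (the rewrite author's own statement) =====
-- stated objective: simpler
-- what changed: Replaces A's four zip-based reversal-rotations with a direct single-pass scheme: compute the minimum row width, mark which columns contain a 0, and rebuild each row by index (no rotation or transposition at all).
import Mathlib
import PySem

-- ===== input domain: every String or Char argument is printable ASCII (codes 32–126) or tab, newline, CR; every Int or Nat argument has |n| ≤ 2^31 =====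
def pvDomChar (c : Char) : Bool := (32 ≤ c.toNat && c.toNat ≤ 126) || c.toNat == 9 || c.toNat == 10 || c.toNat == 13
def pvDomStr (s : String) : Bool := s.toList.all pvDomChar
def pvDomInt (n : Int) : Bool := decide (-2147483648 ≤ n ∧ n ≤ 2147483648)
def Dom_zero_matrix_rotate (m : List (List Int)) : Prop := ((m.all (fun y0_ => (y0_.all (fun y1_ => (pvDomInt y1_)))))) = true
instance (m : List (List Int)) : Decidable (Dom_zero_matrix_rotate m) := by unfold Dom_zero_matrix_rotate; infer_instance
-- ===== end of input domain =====

-- B replaces A's four zip-based reversal-rotations by directly marking the 0-containing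
-- columns (up to the minimum row width) and rebuilding the rows by index (objective: simpler).

-- minimum row length of a nonempty list of rows; 0 for no rows (= number of columns Python's zip(*·) yields)
def wmin : List (List Int) → Nat
  | [] => 0
  | [r] => r.length
  | r :: s :: rs => min r.length (wmin (s :: rs))

-- model of Python's builtin zip(*xs) (rows as lists): the j-th elements of every row,
-- for each j below the minimum row length; exact — every access is in bounds, so getD's default is never used
def pyZip (xs : List (List Int)) : List (List Int) :=
  (List.range (wmin xs)).map (fun j => xs.map (fun r => r.getD j 0))

-- ===== PORT A =====
def zero_matrix_rotate (m : List (List Int)) : List (List Int) :=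
  -- m_r = list(zip(*m[::-1])); then each row containing 0 is replaced by [0]*len(row)
  let m_r := (pyZip m.reverse).map (fun r => if (0 : Int) ∈ r then List.replicate r.length 0 else r)
  let m1 := pyZip m_r.reverse
  let m2 := pyZip m1.reverse
  pyZip m2.reverse

-- ===== PORT B =====
def zero_matrix_rotate_alt (m : List (List Int)) : List (List Int) :=
  if m = [] then []
  else
    let w := wmin m
    if w = 0 then []
    else
      let bad := (List.range w).map (fun j => m.any (fun r => r.getD j 0 == 0))
      m.map (fun r => (List.range w).map (fun j => if bad.getD j false then 0 else r.getD j 0))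

-- ===== PRECONDITION & SPEC =====
def Spec_zero_matrix_rotate (m : List (List Int)) (out : List (List Int)) : Prop := out = zero_matrix_rotate_alt m
instance (m : List (List Int)) (out : List (List Int)) : Decidable (Spec_zero_matrix_rotate m out) := by unfold Spec_zero_matrix_rotate; infer_instance

-- ===== CLAIM (what is proved, stated in full; the proofs are below) =====
def Claim_equal_zero_matrix_rotate : Prop := ∀ (m : List (List Int)), Dom_zero_matrix_rotate m → Spec_zero_matrix_rotate m (zero_matrix_rotate m)

-- ===== LEMMAS AND PROOFS =====

-- wmin is the minimum of the row lengths
lemma wmin_spec (xs : List (List Int)) (hne : xs ≠ []) :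
    (∃ r ∈ xs, wmin xs = r.length) ∧ ∀ r ∈ xs, wmin xs ≤ r.length := by
  induction xs with
  | nil => cases hne rfl
  | cons r rs ih =>
    cases rs with
    | nil => simp [wmin]
    | cons s rs' =>
      obtain ⟨⟨t, ht, hteq⟩, hle⟩ := ih (by simp)
      constructor
      · by_cases h : r.length ≤ wmin (s :: rs')
        · exact ⟨r, by simp, by
            show min r.length (wmin (s :: rs')) = r.length
            rw [Nat.min_eq_left h]⟩
        · have hle' : wmin (s :: rs') ≤ r.length := Nat.le_of_lt (Nat.lt_of_not_le h)
          exact ⟨t, by simp [ht], by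
            show min r.length (wmin (s :: rs')) = t.length
            rw [Nat.min_eq_right hle', hteq]⟩
      · intro u hu
        rcases List.mem_cons.mp hu with h | h
        · subst h; simp [wmin]
        · calc wmin (r :: s :: rs') ≤ wmin (s :: rs') := by simp [wmin]
            _ ≤ u.length := hle u h

lemma wmin_reverse (xs : List (List Int)) : wmin xs.reverse = wmin xs := by
  cases hx : xs with
  | nil => rfl
  | cons a l =>
    have hne : xs ≠ [] := by simp [hx]
    have hner : xs.reverse ≠ [] := by simp [hx]
    obtain ⟨⟨t, ht, hteq⟩, hle⟩ := wmin_spec xs hne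
    obtain ⟨⟨u, hu, hueq⟩, hleR⟩ := wmin_spec xs.reverse hner
    rw [← hx]
    apply le_antisymm
    · rw [hteq]; exact hleR t (List.mem_reverse.mpr ht)
    · rw [hueq]; exact hle u (List.mem_reverse.mp hu)

lemma wmin_const {xs : List (List Int)} {n : Nat} (hne : xs ≠ []) (hc : ∀ r ∈ xs, r.length = n) :
    wmin xs = n := by
  obtain ⟨⟨t, ht, hteq⟩, _⟩ := wmin_spec xs hne
  rw [hteq, hc t ht]

lemma pyZip_length (xs : List (List Int)) : (pyZip xs).length = wmin xs := by simp [pyZip]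

lemma pyZip_row_length {xs : List (List Int)} {r : List Int} (h : r ∈ pyZip xs) :
    r.length = xs.length := by
  simp only [pyZip, List.mem_map] at h
  obtain ⟨j, _, rfl⟩ := h
  simp

-- bounded getD helpers
lemma getD_lt {α : Type} {l : List α} {i : Nat} (h : i < l.length) (d : α) :
    l.getD i d = l[i] := List.getD_eq_getElem l d h

lemma getD_reverse {α : Type} {l : List α} {i : Nat} (h : i < l.length) (d : α) :
    l.reverse.getD i d = l.getD (l.length - 1 - i) d := by
  rw [getD_lt (by simpa using h), getD_lt (by omega), List.getElem_reverse]

lemma pyZip_row {xs : List (List Int)} {j : Nat} (hj : j < wmin xs) :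
    (pyZip xs).getD j [] = xs.map (fun r => r.getD j 0) := by
  rw [getD_lt (by simpa [pyZip_length] using hj)]
  simp [pyZip]

lemma getD_map' {α β : Type} (f : α → β) {l : List α} {i : Nat} (h : i < l.length) (d : β) (d' : α) :
    (l.map f).getD i d = f (l.getD i d') := by
  rw [getD_lt (by simpa using h), getD_lt h, List.getElem_map]

-- the (j,i)-entry of pyZip xs, for j < wmin xs and i < xs.length
lemma pyZip_entry {xs : List (List Int)} {j i : Nat} (hj : j < wmin xs) (hi : i < xs.length) :
    ((pyZip xs).getD j []).getD i 0 = (xs.getD i []).getD j 0 := by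
  rw [pyZip_row hj, getD_lt (by simpa using hi), List.getElem_map, getD_lt hi]

-- main equality
lemma zero_matrix_eq (m : List (List Int)) : zero_matrix_rotate m = zero_matrix_rotate_alt m := by
  by_cases hm : m = []
  · subst hm; rfl
  set n := m.length with hn
  have hnpos : 0 < n := by simpa [hn] using List.length_pos_iff.mpr hm
  set w := wmin m with hw
  by_cases hw0 : w = 0
  · -- no columns: both sides are []
    have hw0' : wmin m = 0 := by rw [← hw]; exact hw0
    have h1 : pyZip m.reverse = [] := by
      simp [pyZip, wmin_reverse, hw0']
    have hA : zero_matrix_rotate m = [] := by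
      unfold zero_matrix_rotate
      rw [h1]
      rfl
    have hB : zero_matrix_rotate_alt m = [] := by
      simp [zero_matrix_rotate_alt, hm, hw0']
    rw [hA, hB]
  -- positive width
  have hwpos : 0 < w := Nat.pos_of_ne_zero hw0
  -- shapes of the intermediate matrices
  set mr : List (List Int) :=
    (pyZip m.reverse).map (fun r => if (0 : Int) ∈ r then List.replicate r.length 0 else r) with hmr
  have hmr_len : mr.length = w := by simp [hmr, pyZip_length, wmin_reverse, ← hw]
  have hmr_rows : ∀ r ∈ mr, r.length = n := by
    intro r hr
    simp only [hmr, List.mem_map] at hr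
    obtain ⟨s, hs, rfl⟩ := hr
    have := pyZip_row_length hs
    split <;> simpa [hn] using this
  set m1 := pyZip mr.reverse with hm1
  have hmrne : mr ≠ [] := by
    intro h; rw [h] at hmr_len; simp at hmr_len; omega
  have hwmr : wmin mr.reverse = n := by
    rw [wmin_reverse]; exact wmin_const hmrne hmr_rows
  have hm1_len : m1.length = n := by simp [hm1, pyZip_length, hwmr]
  have hm1_rows : ∀ r ∈ m1, r.length = w := by
    intro r hr; rw [pyZip_row_length hr]; simp [hmr_len]
  set m2 := pyZip m1.reverse with hm2
  have hm1ne : m1 ≠ [] := by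
    intro h; rw [h] at hm1_len; simp at hm1_len; omega
  have hwm1 : wmin m1.reverse = w := by
    rw [wmin_reverse]; exact wmin_const hm1ne hm1_rows
  have hm2_len : m2.length = w := by simp [hm2, pyZip_length, hwm1]
  have hm2_rows : ∀ r ∈ m2, r.length = n := by
    intro r hr; rw [pyZip_row_length hr]; simp [hm1_len]
  set m3 := pyZip m2.reverse with hm3
  have hm2ne : m2 ≠ [] := by
    intro h; rw [h] at hm2_len; simp at hm2_len; omega
  have hwm2 : wmin m2.reverse = n := by
    rw [wmin_reverse]; exact wmin_const hm2ne hm2_rows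
  have hm3_len : m3.length = n := by simp [hm3, pyZip_length, hwm2]
  have hm3_rows : ∀ r ∈ m3, r.length = w := by
    intro r hr; rw [pyZip_row_length hr]; simp [hm2_len]
  -- B's outer shape
  have hwm : wmin m = w := hw.symm
  have hB : zero_matrix_rotate_alt m =
      m.map (fun r => (List.range w).map (fun j =>
        if ((List.range w).map (fun j => m.any (fun r => r.getD j 0 == 0))).getD j false then 0
        else r.getD j 0)) := by
    simp [zero_matrix_rotate_alt, hm, hwm, hw0]
  have hA : zero_matrix_rotate m = m3 := rfl
  rw [hA, hB]
  -- elementwise comparison, kept entirely in getD form (no proof-carrying indices)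
  apply List.ext_getElem
  · rw [hm3_len]; simp [hn]
  intro i hi hi'
  have hin : i < n := by rwa [hm3_len] at hi
  rw [← getD_lt hi ([] : List Int), ← getD_lt hi' ([] : List Int),
      getD_map' _ (by simpa [hn] using hin) ([] : List Int) ([] : List Int)]
  have h3i : m3.getD i [] = m2.reverse.map (fun r => r.getD i 0) := by
    rw [hm3]; exact pyZip_row (by rw [hwm2]; exact hin)
  rw [h3i]
  apply List.ext_getElem
  · simp [hm2_len]
  intro j hj hj'
  have hjw : j < w := by simpa [hm2_len] using hj
  rw [← getD_lt hj (0 : Int), ← getD_lt hj' (0 : Int)]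
  -- right-hand entry
  rw [PySem.List.getD_map_range _ _ _ _ hjw, PySem.List.getD_map_range _ _ _ _ hjw]
  -- left-hand entry: peel the three rotations
  have eL : (m2.reverse.map (fun r => r.getD i 0)).getD j 0 = (m2.getD (w - 1 - j) []).getD i 0 := by
    have hj2 : j < m2.length := by rw [hm2_len]; exact hjw
    rw [getD_lt (by simpa using hj2), List.getElem_map, List.getElem_reverse,
        ← getD_lt (show m2.length - 1 - j < m2.length by omega) ([] : List Int), hm2_len]
  have e2 : (m2.getD (w - 1 - j) []).getD i 0 = (m1.getD (n - 1 - i) []).getD (w - 1 - j) 0 := by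
    rw [hm2, pyZip_entry (by rw [hwm1]; omega) (by simp [hm1_len]; exact hin),
        getD_reverse (show i < m1.length by rw [hm1_len]; exact hin), hm1_len]
  have e1 : (m1.getD (n - 1 - i) []).getD (w - 1 - j) 0 = (mr.getD j []).getD (n - 1 - i) 0 := by
    rw [hm1, pyZip_entry (by rw [hwmr]; omega) (by simp [hmr_len]; omega),
        getD_reverse (show w - 1 - j < mr.length by rw [hmr_len]; omega), hmr_len]
    have hidx : w - 1 - (w - 1 - j) = j := by omega
    rw [hidx]
  -- the j-th row of mr is the j-th column of m.reverse, possibly zeroed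
  have hmrj : mr.getD j [] =
      (if (0 : Int) ∈ m.reverse.map (fun r => r.getD j 0)
        then List.replicate (m.reverse.map (fun r => r.getD j 0)).length 0
        else m.reverse.map (fun r => r.getD j 0)) := by
    have hjz : j < (pyZip m.reverse).length := by
      rw [pyZip_length, wmin_reverse, hwm]; exact hjw
    rw [hmr, getD_map' _ hjz ([] : List Int) ([] : List Int),
        pyZip_row (by rw [wmin_reverse, hwm]; exact hjw)]
  have hbadiff : ((0 : Int) ∈ m.reverse.map (fun r => r.getD j 0)) ↔
      (m.any (fun r => r.getD j 0 == 0) = true) := by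
    simp only [List.mem_map, List.mem_reverse, List.any_eq_true, beq_iff_eq]
  rw [eL, e2, e1, hmrj]
  by_cases hz : (0 : Int) ∈ m.reverse.map (fun r => r.getD j 0)
  · rw [if_pos hz, if_pos (hbadiff.mp hz),
        getD_lt (show n - 1 - i < (List.replicate (m.reverse.map (fun r => r.getD j 0)).length (0 : Int)).length
          by simp [hn]; omega)]
    simp
  · rw [if_neg hz, if_neg (fun hb => hz (hbadiff.mpr hb)),
        getD_map' _ (show n - 1 - i < m.reverse.length by simp [hn]; omega) (0 : Int) ([] : List Int),
        getD_reverse (show n - 1 - i < m.length by rw [← hn]; omega)]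
    have hidx : m.length - 1 - (n - 1 - i) = i := by rw [← hn]; omega
    rw [hidx]

-- ===== VERDICT (by name: the statement is the Claim_ definition above) =====
theorem zero_matrix_rotate_spec : Claim_equal_zero_matrix_rotate := by
  intro m _
  exact zero_matrix_eq m
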